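-- pv_equiv track=rewrite | github.com/hacksparr0w/aoc_2024 | d04p01.py | overlap_find
-- ===== SOURCE A (Python) =====
-- def find_indices(text, character, start_index):
--     indices = []
--
--     for index in range(start_index, len(text)):
--         if text[index] == character:
--             indices.append(index)
--
--     return indices
--
-- def overlap_find(text, keyword, start_index = 0):
--     if len(keyword) == 0:
--         return []
--
--     if len(keyword) == 1:
--         return [[index] for index in find_indices(text, keyword, start_index)]
--
--     head, tail = keyword[0], keyword[1:]
--     result = []
--
--     for head_index in find_indices(text, head, start_index):
--         for tail_indices in overlap_find(text, tail, head_index + 1):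
--             result.append([head_index] + tail_indices)
--
--     return result
-- ===== SOURCE B (Python) =====
-- def overlap_find(text, keyword, start_index=0):
--     # Right-to-left DP over text: one pass, no recomputation of suffix matches.
--     # A negative start_index is clamped to 0 (no wraparound matches).
--     k = len(keyword)
--     if k == 0:
--         return []
--     n = len(text)
--     lists = [[] for _ in range(k)] + [[[]]]
--     lo = max(start_index, 0)
--     for p in range(n - 1, lo - 1, -1):
--         c = text[p]
--         for j in range(k):
--             if keyword[j] == c:
--                 lists[j] = [[p] + t for t in lists[j + 1]] + lists[j]
--     return lists[0]
-- ===== Notes on version B (the rewrite author's own statement) =====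
-- stated objective: alternative
-- what changed: A enumerates matches by recursing on the keyword and re-running overlap_find on the keyword tail for every occurrence of the head (recomputing suffix matches over and over); B makes a single right-to-left pass over the text maintaining, for every keyword suffix, the list of its matches so far, so each suffix's match list is computed once and shared.
-- intended difference: On a negative start_index whose wrapped-around scan completes a match (Python's negative indexing in find_indices), A also returns extra index lists containing negative indices; B clamps the start to 0 and returns only the real matches, which is the intended meaning of a start offset. — e.g. on overlap_find("ab", "ab", -2): A returns [[-2, -1], [-2, 1], [0, 1]], B returns [[0, 1]]
import Mathlib
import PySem

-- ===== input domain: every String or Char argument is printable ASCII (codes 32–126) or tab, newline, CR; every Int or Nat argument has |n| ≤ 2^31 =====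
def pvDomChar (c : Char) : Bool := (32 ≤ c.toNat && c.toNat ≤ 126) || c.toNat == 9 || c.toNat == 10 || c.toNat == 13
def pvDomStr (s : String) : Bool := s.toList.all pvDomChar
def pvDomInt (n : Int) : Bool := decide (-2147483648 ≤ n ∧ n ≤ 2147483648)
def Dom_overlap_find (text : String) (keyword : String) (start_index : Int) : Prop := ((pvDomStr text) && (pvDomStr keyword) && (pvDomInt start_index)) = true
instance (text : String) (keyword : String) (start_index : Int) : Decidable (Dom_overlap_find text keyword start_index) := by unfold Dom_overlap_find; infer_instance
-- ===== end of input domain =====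

-- B replaces A's per-occurrence recursive re-enumeration by a single right-to-left pass that
-- shares the suffix-match lists (objective: alternative algorithm; a negative start_index is
-- clamped to 0 in B, where A's wraparound is a quirk — see D_ below).

-- ===== PORT A =====
-- find_indices(text, character, start_index); 'text[index] == character' compares a 1-char
-- string with the 1-char string 'character' — ported exactly as the Char comparison.
def findIndicesA (text : List Char) (character : Char) (start_index : Int) : List Int :=
  (PySem.List.pyRange start_index (text.length : Int)).foldl
    (fun indices index =>
      if PySem.List.pyGet? text index == some character then indices ++ [index] else indices) []

-- overlap_find's recursion over keyword (keyword[0] / keyword[1:] become head / tail).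
def overlapA (text : List Char) : List Char → Int → List (List Int)
  | [], _ => []
  | [c], s => (findIndicesA text c s).map (fun index => [index])
  | c :: tail, s =>
      (findIndicesA text c s).foldl
        (fun result head_index =>
          (overlapA text tail (head_index + 1)).foldl
            (fun result tail_indices => result ++ [head_index :: tail_indices]) result) []

def overlap_find (text : String) (keyword : String) (start_index : Int) : List (List Int) :=
  overlapA text.toList keyword.toList start_index

-- ===== PORT B =====
-- the inner 'for j in range(k)' of Source B: walks keyword and the state list together,
-- reading lists[j+1] (= rest.headD []) before it is updated, exactly as the Python does.
def stepB (p : Int) (c : Char) : List Char → List (List (List Int)) → List (List (List Int))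
  | [], L => L
  | _ :: _, [] => []
  | kj :: ks, Lj :: rest =>
      (if kj == c then (rest.headD []).map (fun t => p :: t) ++ Lj else Lj) :: stepB p c ks rest

def overlap_find_alt (text : String) (keyword : String) (start_index : Int) : List (List Int) :=
  let K := keyword.toList
  let T := text.toList
  if K.length = 0 then []
  else
    let lo := max start_index 0
    let init : List (List (List Int)) := List.replicate K.length [] ++ [[[]]]
    -- text[p] with p always in range (lo ≤ p < len); pyGetD's default is never used
    let final := (PySem.List.pyRange ((T.length : Int) - 1) (lo - 1) (-1)).foldl
      (fun L p => stepB p (PySem.List.pyGetD T p ' ') K L) init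
    final.headD []

-- ===== PRECONDITION & SPEC =====
-- Pre_ excludes exactly the inputs where A raises IndexError: a nonempty keyword with
-- start_index below -len(text) (and below len(text), so the range is nonempty).
def Pre_overlap_find (text : String) (keyword : String) (start_index : Int) : Prop :=
  keyword.toList = [] ∨ -(text.toList.length : Int) ≤ start_index ∨ (text.toList.length : Int) ≤ start_index
instance (text : String) (keyword : String) (start_index : Int) : Decidable (Pre_overlap_find text keyword start_index) := by unfold Pre_overlap_find; infer_instance

def pvWitness_overlap_find : String × String × Int := ("abcab", "ab", 0)

-- On a negative start_index whose wrapped-around scan completes a match, A returns extra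
-- index lists containing negative indices (an accident of Python's negative indexing in
-- find_indices); B clamps the start to 0 and returns only the real matches, which is intended.
def D_overlap_find (text : String) (keyword : String) (start_index : Int) : Prop :=
  start_index < 0 ∧ keyword.toList ≠ [] ∧
    ∃ p ∈ List.range text.toList.length,
      (text.toList.length : Int) + start_index ≤ (p : Int) ∧
      text.toList[p]? = keyword.toList.head? ∧
      List.Sublist keyword.toList.tail (text.toList.drop (p + 1) ++ text.toList)
instance (text : String) (keyword : String) (start_index : Int) : Decidable (D_overlap_find text keyword start_index) := by unfold D_overlap_find; infer_instance

def Spec_overlap_find (text : String) (keyword : String) (start_index : Int) (out : List (List Int)) : Prop := ¬ D_overlap_find text keyword start_index → out = overlap_find_alt text keyword start_index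
instance (text : String) (keyword : String) (start_index : Int) (out : List (List Int)) : Decidable (Spec_overlap_find text keyword start_index out) := by unfold Spec_overlap_find; infer_instance

def pvDiffWitness_overlap_find : String × String × Int := ("ab", "ab", -2)
def pvDiffWitnessOut_overlap_find : (List (List Int)) × (List (List Int)) :=
  ([[-2, -1], [-2, 1], [0, 1]], [[0, 1]])

-- ===== CLAIM (what is proved, stated in full; the proofs are below) =====
def Claim_unchanged_overlap_find : Prop := ∀ (text : String) (keyword : String) (start_index : Int), Dom_overlap_find text keyword start_index → Pre_overlap_find text keyword start_index → Spec_overlap_find text keyword start_index (overlap_find text keyword start_index)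
def Claim_changed_overlap_find : Prop := Dom_overlap_find (pvDiffWitness_overlap_find.1) (pvDiffWitness_overlap_find.2.1) (pvDiffWitness_overlap_find.2.2) ∧ Pre_overlap_find (pvDiffWitness_overlap_find.1) (pvDiffWitness_overlap_find.2.1) (pvDiffWitness_overlap_find.2.2) ∧ D_overlap_find (pvDiffWitness_overlap_find.1) (pvDiffWitness_overlap_find.2.1) (pvDiffWitness_overlap_find.2.2) ∧ overlap_find (pvDiffWitness_overlap_find.1) (pvDiffWitness_overlap_find.2.1) (pvDiffWitness_overlap_find.2.2) = pvDiffWitnessOut_overlap_find.1 ∧ overlap_find_alt (pvDiffWitness_overlap_find.1) (pvDiffWitness_overlap_find.2.1) (pvDiffWitness_overlap_find.2.2) = pvDiffWitnessOut_overlap_find.2 ∧ pvDiffWitnessOut_overlap_find.1 ≠ pvDiffWitnessOut_overlap_find.2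
def Claim_exact_overlap_find : Prop := ∀ (text : String) (keyword : String) (start_index : Int), Dom_overlap_find text keyword start_index → Pre_overlap_find text keyword start_index → D_overlap_find text keyword start_index → overlap_find text keyword start_index ≠ overlap_find_alt text keyword start_index

-- ===== LEMMAS AND PROOFS =====

-- The common specification: matches of a keyword against an explicit list of candidate
-- text indices (looked up with Python semantics), in A's output order.
def gSpec (T : List Char) : List Char → List Int → List (List Int)
  | [], _ => [[]]
  | _ :: _, [] => []
  | c :: ks, i :: rest =>
      (if PySem.List.pyGet? T i == some c then (gSpec T ks rest).map (fun t => i :: t) else []) ++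
        gSpec T (c :: ks) rest
  termination_by K E => (E.length, K.length)

theorem gSpec_nil_keyword (T : List Char) (E : List Int) : gSpec T [] E = [[]] := by
  cases E <;> rw [gSpec]

theorem gSpec_cons_nil (T : List Char) (c : Char) (ks : List Char) :
    gSpec T (c :: ks) [] = [] := by rw [gSpec]

theorem gSpec_cons_cons (T : List Char) (c : Char) (ks : List Char) (i : Int) (rest : List Int) :
    gSpec T (c :: ks) (i :: rest) =
      (if PySem.List.pyGet? T i == some c then (gSpec T ks rest).map (fun t => i :: t) else []) ++
        gSpec T (c :: ks) rest := by rw [gSpec]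

theorem findIndicesA_eq (T : List Char) (c : Char) (s : Int) :
    findIndicesA T c s =
      (PySem.List.pyRange s (T.length : Int)).filter
        (fun i => PySem.List.pyGet? T i == some c) := by
  simpa [findIndicesA] using
    PySem.List.foldl_append_if_eq_filter
      (fun i => PySem.List.pyGet? T i == some c) (PySem.List.pyRange s (T.length : Int)) []

theorem gSpec_pyRange_flat (T : List Char) (c : Char) (ks : List Char) :
    ∀ (m : Nat) (t : Int), ((T.length : Int) - t).toNat = m →
      gSpec T (c :: ks) (PySem.List.pyRange t (T.length : Int)) =
        (findIndicesA T c t).flatMap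
          (fun i => (gSpec T ks (PySem.List.pyRange (i + 1) (T.length : Int))).map
            (fun u => i :: u)) := by
  intro m
  induction m with
  | zero =>
    intro t ht
    have hle : (T.length : Int) ≤ t := by omega
    rw [PySem.List.pyRange_one_eq_nil hle, findIndicesA_eq,
      PySem.List.pyRange_one_eq_nil hle, gSpec_cons_nil]
    simp
  | succ m ih =>
    intro t ht
    have hlt : t < (T.length : Int) := by omega
    rw [PySem.List.pyRange_one_cons hlt, gSpec_cons_cons, ih (t + 1) (by omega),
      findIndicesA_eq, findIndicesA_eq, PySem.List.pyRange_one_cons hlt, List.filter_cons]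
    by_cases hb : (PySem.List.pyGet? T t == some c) = true
    · simp only [hb, if_true, List.flatMap_cons]
    · simp only [hb, if_false, Bool.false_eq_true, List.nil_append]

theorem overlapA_eq_g (T : List Char) (ks : List Char) :
    ∀ (c : Char) (s : Int),
      overlapA T (c :: ks) s = gSpec T (c :: ks) (PySem.List.pyRange s (T.length : Int)) := by
  induction ks with
  | nil =>
    intro c s
    rw [gSpec_pyRange_flat T c [] (((T.length : Int) - s).toNat) s rfl]
    simp only [overlapA, gSpec_nil_keyword, List.map_cons, List.map_nil]
    rw [← List.map_eq_flatMap]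
  | cons c2 ks ih =>
    intro c s
    simp only [overlapA]
    have h1 : ∀ (res : List (List Int)) (hi : Int),
        (overlapA T (c2 :: ks) (hi + 1)).foldl
            (fun r t => r ++ [hi :: t]) res =
          res ++ (overlapA T (c2 :: ks) (hi + 1)).map (fun t => hi :: t) := fun res hi =>
      PySem.List.foldl_append_singleton_eq_map _ _ _
    simp only [h1]
    rw [PySem.List.foldl_append_eq_flatMap]
    simp only [ih]
    rw [gSpec_pyRange_flat T c (c2 :: ks) (((T.length : Int) - s).toNat) s rfl]
    simp

-- B's state after the scan has reached down to index q, componentwise.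
def stB (T : List Char) (q : Int) : List Char → List (List (List Int))
  | [] => [[[]]]
  | c :: ks => gSpec T (c :: ks) (PySem.List.pyRange q (T.length : Int)) :: stB T q ks

theorem stB_head (T : List Char) (q : Int) (K : List Char) :
    (stB T q K).headD [] = gSpec T K (PySem.List.pyRange q (T.length : Int)) := by
  cases K with
  | nil => simp [stB, gSpec_nil_keyword]
  | cons c ks => simp [stB]

theorem stepB_st (T : List Char) (p : Int) (c : Char) (h1 : p < (T.length : Int))
    (hc : PySem.List.pyGet? T p = some c) :
    ∀ K, stepB p c K (stB T (p + 1) K) = stB T p K := by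
  intro K
  induction K with
  | nil => rfl
  | cons kj ks ih =>
    simp only [stB, stepB, ih]
    rw [stB_head, PySem.List.pyRange_one_cons h1, gSpec_cons_cons, hc]
    by_cases h : kj = c
    · subst h; simp
    · have hb1 : (kj == c) = false := by simp [h]
      have hb2 : (some c == some kj) = false := by simp [Ne.symm h]
      simp [hb1, hb2]

theorem stB_top (T : List Char) (K : List Char) :
    stB T (T.length : Int) K = List.replicate K.length [] ++ [[[]]] := by
  induction K with
  | nil => rfl
  | cons c ks ih =>
    simp only [stB, ih, PySem.List.pyRange_one_eq_nil (le_refl _), gSpec_cons_nil,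
      List.length_cons, List.replicate_succ, List.cons_append]

theorem foldl_desc (T : List Char) (K : List Char) (lo : Int) (hlo : 0 ≤ lo) :
    ∀ (m : Nat) (hi : Int), (hi + 1 - lo).toNat = m → lo ≤ hi + 1 → hi + 1 ≤ (T.length : Int) →
      (PySem.List.pyRange hi (lo - 1) (-1)).foldl
          (fun L p => stepB p (PySem.List.pyGetD T p ' ') K L) (stB T (hi + 1) K) =
        stB T lo K := by
  intro m
  induction m with
  | zero =>
    intro hi hm h1 h2
    have he : hi + 1 = lo := by omega
    rw [PySem.List.pyRange_neg_one_eq_nil (by omega), List.foldl_nil, he]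
  | succ m ih =>
    intro hi hm h1 h2
    have hlo2 : lo ≤ hi := by omega
    rw [PySem.List.pyRange_neg_one_cons (by omega), List.foldl_cons]
    have h0p : 0 ≤ hi := by omega
    have hltn : hi < (T.length : Int) := by omega
    have hget : PySem.List.pyGet? T hi = some (PySem.List.pyGetD T hi ' ') := by
      rw [PySem.List.pyGetD_of_nonneg T ' ' h0p,
        PySem.List.pyGet?_eq_some_getElem T h0p hltn,
        List.getD_eq_getElem T ' ' (by omega)]
    rw [stepB_st T hi _ hltn hget K]
    have h := ih (hi - 1) (by omega) (by omega) (by omega)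
    rw [show hi - 1 + 1 = hi from by ring] at h
    exact h

theorem alt_eq_g (text keyword : String) (s : Int) (hk : keyword.toList ≠ []) :
    overlap_find_alt text keyword s =
      gSpec text.toList keyword.toList
        (PySem.List.pyRange (max s 0) (text.toList.length : Int)) := by
  have hlen : ¬ keyword.toList.length = 0 := by simpa using hk
  simp only [overlap_find_alt]
  rw [if_neg hlen, ← stB_top text.toList keyword.toList]
  by_cases hc : max s 0 ≤ (text.toList.length : Int)
  · have h := foldl_desc text.toList keyword.toList (max s 0) (le_max_right _ _)
      ((text.toList.length : Int) - max s 0).toNat ((text.toList.length : Int) - 1)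
      (by omega) (by omega) (by omega)
    rw [show (text.toList.length : Int) - 1 + 1 = (text.toList.length : Int) from by ring] at h
    rw [h, stB_head]
  · rw [PySem.List.pyRange_neg_one_eq_nil (by omega), List.foldl_nil, stB_head,
      PySem.List.pyRange_one_eq_nil (le_refl ((text.toList.length : Int))),
      PySem.List.pyRange_one_eq_nil (by omega)]

theorem g_ne_nil_iff (T : List Char) :
    ∀ (E : List Int) (K : List Char),
      gSpec T K E ≠ [] ↔ List.Sublist K (E.filterMap (fun i => PySem.List.pyGet? T i)) := by
  intro E
  induction E with
  | nil =>
    intro K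
    cases K with
    | nil => simp [gSpec_nil_keyword]
    | cons c ks => simp [gSpec_cons_nil]
  | cons i rest ih =>
    intro K
    cases K with
    | nil => simp [gSpec_nil_keyword, List.nil_sublist]
    | cons c ks =>
      rw [gSpec_cons_cons, List.filterMap_cons]
      cases hv : PySem.List.pyGet? T i with
      | none =>
        rw [show ((none : Option Char) == some c) = false from rfl]
        simp only [Bool.false_eq_true, if_false, List.nil_append]
        exact ih (c :: ks)
      | some x =>
        by_cases hxc : x = c
        · subst hxc
          simp only [beq_self_eq_true, if_true]
          rw [Ne, List.append_eq_nil_iff, not_and_or, ← Ne, ← Ne]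
          rw [show ((gSpec T ks rest).map (fun t => i :: t) ≠ [] ↔ gSpec T ks rest ≠ []) from
            by simp]
          rw [ih ks, ih (x :: ks)]
          constructor
          · rintro (h | h)
            · exact List.sublist_cons_iff.mpr (Or.inr ⟨ks, rfl, h⟩)
            · exact List.sublist_cons_iff.mpr (Or.inl h)
          · intro h
            rcases List.sublist_cons_iff.mp h with h | ⟨l', he, hl⟩
            · exact Or.inr h
            · injection he with h1 h2
              subst h2
              exact Or.inl hl
        · have hb2 : ((some x : Option Char) == some c) = false := by simp [hxc]
          simp only [hb2, Bool.false_eq_true, if_false, List.nil_append]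
          rw [ih (c :: ks)]
          constructor
          · intro h
            exact List.sublist_cons_iff.mpr (Or.inl h)
          · intro h
            rcases List.sublist_cons_iff.mp h with h | ⟨l', he, hl⟩
            · exact h
            · injection he with h1 h2
              exact absurd h1.symm hxc

theorem chars_pos (T : List Char) :
    ∀ (m : Nat) (a : Int), 0 ≤ a → ((T.length : Int) - a).toNat = m →
      (PySem.List.pyRange a (T.length : Int)).filterMap (fun i => PySem.List.pyGet? T i) =
        T.drop a.toNat := by
  intro m
  induction m with
  | zero =>
    intro a h0 hm
    rw [PySem.List.pyRange_one_eq_nil (by omega), List.filterMap_nil]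
    exact (List.drop_eq_nil_of_le (by omega)).symm
  | succ m ih =>
    intro a h0 hm
    have hlt : a < (T.length : Int) := by omega
    rw [PySem.List.pyRange_one_cons hlt, List.filterMap_cons]
    simp only [PySem.List.pyGet?_eq_some_getElem T h0 hlt]
    rw [ih (a + 1) (by omega) (by omega),
      show (a + 1).toNat = a.toNat + 1 from by omega]
    exact (List.drop_eq_getElem_cons (by omega)).symm

theorem chars_neg (T : List Char) :
    ∀ (m : Nat) (t : Int), -(T.length : Int) ≤ t → t ≤ 0 → (-t).toNat = m →
      (PySem.List.pyRange t 0).filterMap (fun i => PySem.List.pyGet? T i) =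
        T.drop ((T.length : Int) + t).toNat := by
  intro m
  induction m with
  | zero =>
    intro t h0 h1 hm
    rw [PySem.List.pyRange_one_eq_nil (by omega), List.filterMap_nil]
    exact (List.drop_eq_nil_of_le (by omega)).symm
  | succ m ih =>
    intro t h0 h1 hm
    have htneg : t < 0 := by omega
    rw [PySem.List.pyRange_one_cons (by omega), List.filterMap_cons]
    have hkt : t = -(((-t).toNat : Nat) : Int) := by omega
    rw [hkt, PySem.List.pyGet?_neg_natCast T (-t).toNat (by omega) (by omega)]
    rw [List.getElem?_eq_getElem (show T.length - (-t).toNat < T.length by omega)]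
    have h2 := ih (t + 1) (by omega) (by omega) (by omega)
    rw [hkt] at h2
    rw [show -(((-t).toNat : Nat) : Int) + 1 = -((((-t).toNat - 1 : Nat)) : Int) from by omega]
      at h2
    rw [show (-(((-t).toNat : Nat) : Int) + 1) = -((((-t).toNat - 1 : Nat)) : Int) from by omega]
    rw [h2]
    rw [show ((T.length : Int) + -((((-t).toNat - 1 : Nat)) : Int)).toNat
        = (T.length - (-t).toNat) + 1 from by omega,
      show ((T.length : Int) + -(((-t).toNat : Nat) : Int)).toNat
        = T.length - (-t).toNat from by omega]
    exact (List.drop_eq_getElem_cons (by omega)).symm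

theorem chars_from (T : List Char) (t : Int) (h0 : -(T.length : Int) ≤ t) (h1 : t ≤ 0) :
    (PySem.List.pyRange t (T.length : Int)).filterMap (fun i => PySem.List.pyGet? T i) =
      T.drop ((T.length : Int) + t).toNat ++ T := by
  rw [PySem.List.pyRange_one_append t 0 (T.length : Int) h1 (by omega), List.filterMap_append,
    chars_neg T (-t).toNat t h0 h1 rfl, chars_pos T T.length 0 (by omega) (by omega)]
  simp

theorem g_drop_negpart (T : List Char) (c : Char) (ks : List Char) (V : List Int) (s0 : Int)
    (H : ∀ i : Int, s0 ≤ i → i < 0 → PySem.List.pyGet? T i = some c →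
      gSpec T ks (PySem.List.pyRange (i + 1) 0 ++ V) = []) :
    ∀ (m : Nat) (t : Int), s0 ≤ t → t ≤ 0 → (-t).toNat = m →
      gSpec T (c :: ks) (PySem.List.pyRange t 0 ++ V) = gSpec T (c :: ks) V := by
  intro m
  induction m with
  | zero =>
    intro t hs ht hm
    rw [PySem.List.pyRange_one_eq_nil (by omega), List.nil_append]
  | succ m ih =>
    intro t hs ht hm
    have htneg : t < 0 := by omega
    rw [PySem.List.pyRange_one_cons (by omega), List.cons_append, gSpec_cons_cons]
    by_cases hb : (PySem.List.pyGet? T t == some c) = true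
    · simp only [hb, if_true]
      rw [H t hs htneg (eq_of_beq hb)]
      simp only [List.map_nil, List.nil_append]
      exact ih (t + 1) (by omega) (by omega) (by omega)
    · simp only [hb, Bool.false_eq_true, if_false, List.nil_append]
      exact ih (t + 1) (by omega) (by omega) (by omega)

theorem mem_g_append_left (T : List Char) :
    ∀ (u : List Int) (K : List Char) (E : List Int) (msub : List Int),
      msub ∈ gSpec T K E → msub ∈ gSpec T K (u ++ E) := by
  intro u
  induction u with
  | nil => intro K E msub h; simpa using h
  | cons u0 u' ih =>
    intro K E msub h
    cases K with
    | nil => rw [gSpec_nil_keyword]; rw [gSpec_nil_keyword] at h; exact h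
    | cons c ks =>
      rw [List.cons_append, gSpec_cons_cons]
      exact List.mem_append_right _ (ih (c :: ks) E msub h)

theorem mem_g_mem_idx (T : List Char) :
    ∀ (E : List Int) (K : List Char) (msub : List Int) (x : Int),
      msub ∈ gSpec T K E → x ∈ msub → x ∈ E := by
  intro E
  induction E with
  | nil =>
    intro K msub x h hx
    cases K with
    | nil =>
      rw [gSpec_nil_keyword] at h
      simp at h
      subst h
      simp at hx
    | cons c ks =>
      rw [gSpec_cons_nil] at h
      simp at h
  | cons i rest ih =>
    intro K msub x h hx
    cases K with
    | nil =>
      rw [gSpec_nil_keyword] at h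
      simp at h
      subst h
      simp at hx
    | cons c ks =>
      rw [gSpec_cons_cons] at h
      rcases List.mem_append.mp h with h1 | h2
      · by_cases hb : (PySem.List.pyGet? T i == some c) = true
        · rw [if_pos hb] at h1
          rcases List.mem_map.mp h1 with ⟨t, htm, rfl⟩
          rcases List.mem_cons.mp hx with rfl | hxt
          · exact List.mem_cons_self
          · exact List.mem_cons_of_mem _ (ih ks t x htm hxt)
        · rw [if_neg hb] at h1
          simp at h1
      · exact List.mem_cons_of_mem _ (ih (c :: ks) msub x h2 hx)

-- ===== VERDICT (by name: the statement is the Claim_ definition above) =====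
theorem overlap_find_spec : Claim_unchanged_overlap_find := by
  intro text keyword s hdom hpre
  unfold Spec_overlap_find
  intro hnd
  rcases hK : keyword.toList with _ | ⟨c, ks⟩
  · simp [overlap_find, overlap_find_alt, hK, overlapA]
  · have hk : keyword.toList ≠ [] := by rw [hK]; simp
    unfold overlap_find
    rw [hK, overlapA_eq_g, alt_eq_g text keyword s hk, hK]
    by_cases hs : 0 ≤ s
    · rw [max_eq_left hs]
    · rw [max_eq_right (le_of_lt (not_le.mp hs))]
      unfold Pre_overlap_find at hpre
      have hn : -(text.toList.length : Int) ≤ s := by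
        rcases hpre with h | h | h
        · exact absurd h hk
        · exact h
        · omega
      rw [PySem.List.pyRange_one_append s 0 (text.toList.length : Int) (by omega) (by omega)]
      refine g_drop_negpart text.toList c ks _ s ?_ ((-s).toNat) s (le_refl s) (by omega) rfl
      intro i hsi hineg hget
      by_contra hne
      have hne2 := (g_ne_nil_iff text.toList _ ks).mp hne
      rw [← PySem.List.pyRange_one_append (i + 1) 0 (text.toList.length : Int) (by omega)
        (by omega)] at hne2
      rw [chars_from text.toList (i + 1) (by omega) (by omega)] at hne2
      apply hnd
      unfold D_overlap_find
      refine ⟨by omega, hk, ((text.toList.length : Int) + i).toNat, ?_, ?_, ?_, ?_⟩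
      · exact List.mem_range.mpr (by omega)
      · omega
      · rw [hK]
        simp only [List.head?_cons]
        have hkt : i = -(((-i).toNat : Nat) : Int) := by omega
        rw [hkt, PySem.List.pyGet?_neg_natCast text.toList (-i).toNat (by omega) (by omega)]
          at hget
        rw [show ((text.toList.length : Int) + i).toNat
            = text.toList.length - (-i).toNat from by omega]
        exact hget
      · rw [hK]
        simp only [List.tail_cons]
        rw [show ((text.toList.length : Int) + i).toNat + 1
            = ((text.toList.length : Int) + (i + 1)).toNat from by omega]
        exact hne2

theorem overlap_find_changed : Claim_changed_overlap_find := by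
  unfold Claim_changed_overlap_find; decide

theorem overlap_find_tight : Claim_exact_overlap_find := by
  unfold Claim_exact_overlap_find
  intro text keyword s hdom hpre hd
  unfold D_overlap_find at hd
  obtain ⟨hs, hkne, p, hpmem, hple, hphead, hpsub⟩ := hd
  rcases hK : keyword.toList with _ | ⟨c, ks⟩
  · exact absurd hK hkne
  rw [hK] at hphead hpsub
  simp only [List.head?_cons, List.tail_cons] at hphead hpsub
  have hp : p < text.toList.length := List.mem_range.mp hpmem
  unfold Pre_overlap_find at hpre
  have hn : -(text.toList.length : Int) ≤ s := by
    rcases hpre with h | h | h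
    · exact absurd h hkne
    · exact h
    · omega
  have hineg : (p : Int) - (text.toList.length : Int) < 0 := by omega
  have hget : PySem.List.pyGet? text.toList ((p : Int) - (text.toList.length : Int)) = some c := by
    have hkt : (p : Int) - (text.toList.length : Int)
        = -(((-((p : Int) - (text.toList.length : Int))).toNat : Nat) : Int) := by omega
    rw [hkt, PySem.List.pyGet?_neg_natCast text.toList _ (by omega) (by omega)]
    rw [show text.toList.length - (-((p : Int) - (text.toList.length : Int))).toNat
        = p from by omega]
    exact hphead
  have hne : gSpec text.toList ks
      (PySem.List.pyRange ((p : Int) - (text.toList.length : Int) + 1)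
        (text.toList.length : Int)) ≠ [] := by
    rw [g_ne_nil_iff text.toList _ ks,
      chars_from text.toList ((p : Int) - (text.toList.length : Int) + 1) (by omega) (by omega)]
    rw [show ((text.toList.length : Int) + ((p : Int) - (text.toList.length : Int) + 1)).toNat
        = p + 1 from by omega]
    exact hpsub
  obtain ⟨t, ht⟩ := List.exists_mem_of_ne_nil _ hne
  intro heq
  have hmemA : ((p : Int) - (text.toList.length : Int)) :: t ∈ overlap_find text keyword s := by
    unfold overlap_find
    rw [hK, overlapA_eq_g]
    rw [PySem.List.pyRange_one_append s ((p : Int) - (text.toList.length : Int))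
      (text.toList.length : Int) (by omega) (by omega)]
    apply mem_g_append_left
    rw [PySem.List.pyRange_one_cons (by omega), gSpec_cons_cons]
    apply List.mem_append_left
    rw [if_pos (by rw [hget]; exact beq_self_eq_true _)]
    exact List.mem_map.mpr ⟨t, ht, rfl⟩
  rw [heq] at hmemA
  rw [alt_eq_g text keyword s (by rw [hK]; simp), max_eq_right (by omega), hK] at hmemA
  have hmemi := mem_g_mem_idx text.toList _ (c :: ks) _
    ((p : Int) - (text.toList.length : Int)) hmemA List.mem_cons_self
  have := (PySem.List.mem_pyRange_one.mp hmemi).1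
  omega
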